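-- pv_equiv track=rewrite | github.com/DL2021Spring/CourseProject | data_files/646 Maximum Length of Pair Chain.py | findLongestChain2
-- ===== SOURCE A (Python) =====
-- from typing import List
--
-- def findLongestChain2(pairs: List[List[int]]) -> int:
--
--     pairs.sort(key=lambda x: x[1])
--     n = len(pairs)
--
--     ret = 0
--     i = 0
--     while i < n:
--         ret += 1
--         cur_end = pairs[i][1]
--
--         i += 1
--         while i < n and pairs[i][0] <= cur_end:
--             i += 1
--
--     return ret
-- ===== SOURCE B (Python) =====
-- def findLongestChain2(pairs):
--     # DP over the end-sorted list: for each position (right to left) the length of the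
--     # longest chain starting there; answer = max. Sorts pairs in place like the original.
--     pairs.sort(key=lambda x: x[1])
--     dps = []   # (start, longest chain starting at that element) for the suffix already processed
--     best = 0
--     for p in reversed(pairs):
--         m = 0
--         for s, v in dps:
--             if p[1] < s and v > m:
--                 m = v
--         cur = 1 + m
--         dps = [(p[0], cur)] + dps
--         best = max(best, cur)
--     return best
-- ===== Notes on version B (the rewrite author's own statement) =====
-- stated objective: alternative
-- what changed: Replaces A's greedy interval-scheduling scan (pick, then skip overlapping pairs) with a longest-chain dynamic program over the end-sorted list: for each pair, 1 + the best chain among already-processed later pairs whose start exceeds its end; the answer is the maximum DP value.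
-- outside the precondition, e.g. on findLongestChain2([[1], [2, 3]]): A raises IndexError, B raises IndexError
import Mathlib
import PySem

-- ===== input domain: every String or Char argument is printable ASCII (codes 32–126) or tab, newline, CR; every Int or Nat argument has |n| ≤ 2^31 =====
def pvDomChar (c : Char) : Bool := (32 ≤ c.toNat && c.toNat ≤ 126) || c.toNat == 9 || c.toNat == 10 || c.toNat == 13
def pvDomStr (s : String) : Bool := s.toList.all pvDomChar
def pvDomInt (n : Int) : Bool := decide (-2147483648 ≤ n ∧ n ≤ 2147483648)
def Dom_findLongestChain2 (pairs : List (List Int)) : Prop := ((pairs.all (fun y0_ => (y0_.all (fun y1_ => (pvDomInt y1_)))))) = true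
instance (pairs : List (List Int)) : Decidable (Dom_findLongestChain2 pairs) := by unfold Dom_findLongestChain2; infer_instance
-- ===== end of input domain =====

-- B replaces A's greedy index scan by an O(n^2) longest-chain DP over the end-sorted list
-- (objective: alternative algorithm, not faster). Both Pythons sort `pairs` in place; the
-- equivalence proved here is about the RETURN value (the in-place sort is identical in both).

-- ===== PORT A =====
-- inner while loop of A: skip pairs whose start is <= cur_end
def pvSkipA (curEnd : Int) : List (List Int) → List (List Int)
  | [] => []
  | p :: t => if PySem.List.pyGetD p 0 0 ≤ curEnd then pvSkipA curEnd t else p :: t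

theorem pvSkipA_length_le (curEnd : Int) (t : List (List Int)) :
    (pvSkipA curEnd t).length ≤ t.length := by
  induction t with
  | nil => simp [pvSkipA]
  | cons p t ih =>
    simp only [pvSkipA]
    split
    · exact Nat.le_succ_of_le ih
    · simp

-- outer while loop of A, recursion on the remaining suffix of the sorted list
def pvLoopA : List (List Int) → Int → Int
  | [], ret => ret
  | p :: t, ret => pvLoopA (pvSkipA (PySem.List.pyGetD p 1 0) t) (ret + 1)
termination_by l _ => l.length
decreasing_by exact Nat.lt_succ_of_le (pvSkipA_length_le _ _)

-- indexing pairs[i][0] / pairs[i][1] uses pyGetD with default 0: exact under Pre_ (every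
-- inner list has length ≥ 2); outside Pre_ the Python raises (IndexError in the sort key).
def findLongestChain2 (pairs : List (List Int)) : Int :=
  pvLoopA (PySem.List.sorted pairs (fun x => PySem.List.pyGetD x 1 0)) 0

-- ===== PORT B =====
-- inner for-loop of B: largest recorded chain length among entries with start > e
def pvInnerB (e : Int) (dps : List (Int × Int)) : Int :=
  dps.foldl (fun m sv => if e < sv.1 ∧ sv.2 > m then sv.2 else m) 0

-- body of B's loop over reversed(pairs); state = (dps, best)
def pvStepB (st : List (Int × Int) × Int) (p : List Int) : List (Int × Int) × Int :=
  let cur := 1 + pvInnerB (PySem.List.pyGetD p 1 0) st.1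
  ((PySem.List.pyGetD p 0 0, cur) :: st.1, max st.2 cur)

def findLongestChain2_alt (pairs : List (List Int)) : Int :=
  (((PySem.List.sorted pairs (fun x => PySem.List.pyGetD x 1 0)).reverse).foldl pvStepB ([], 0)).2

-- ===== PRECONDITION & SPEC =====
-- Pre_ excludes exactly the inputs where the Python A raises: some pair shorter than 2
-- elements makes `x[1]` (sort key) or `pairs[i][0]` raise an IndexError.
def Pre_findLongestChain2 (pairs : List (List Int)) : Prop := ∀ p ∈ pairs, 2 ≤ p.length
instance (pairs : List (List Int)) : Decidable (Pre_findLongestChain2 pairs) := by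
  unfold Pre_findLongestChain2; infer_instance
def pvWitness_findLongestChain2 : List (List Int) := [[3, 4], [1, 2], [0, 6]]
def Spec_findLongestChain2 (pairs : List (List Int)) (out : Int) : Prop := out = findLongestChain2_alt pairs
instance (pairs : List (List Int)) (out : Int) : Decidable (Spec_findLongestChain2 pairs out) := by unfold Spec_findLongestChain2; infer_instance

-- ===== CLAIM (what is proved, stated in full; the proofs are below) =====
def Claim_equal_findLongestChain2 : Prop := ∀ (pairs : List (List Int)), Dom_findLongestChain2 pairs → Pre_findLongestChain2 pairs → Spec_findLongestChain2 pairs (findLongestChain2 pairs)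

-- ===== LEMMAS AND PROOFS =====

-- view of one pair as (start, end)
def pvConv (p : List Int) : Int × Int := (PySem.List.pyGetD p 0 0, PySem.List.pyGetD p 1 0)

-- length of the longest chain in t all of whose starts exceed e
def pvBestFrom (e : Int) : List (Int × Int) → Int
  | [] => 0
  | (a, b) :: t => if e < a then max (1 + pvBestFrom b t) (pvBestFrom e t) else pvBestFrom e t

-- length of the longest chain in t
def pvBestC : List (Int × Int) → Int
  | [] => 0
  | (_, b) :: t => max (pvBestC t) (1 + pvBestFrom b t)

-- A's greedy, on (start, end) pairs, with current end b
def pvGA (b : Int) : List (Int × Int) → Int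
  | [] => 0
  | (a, e) :: t => if a ≤ b then pvGA b t else 1 + pvGA e t

def pvGTop : List (Int × Int) → Int
  | [] => 0
  | (_, e) :: t => 1 + pvGA e t

theorem pvBestFrom_nonneg (e : Int) (t : List (Int × Int)) : 0 ≤ pvBestFrom e t := by
  induction t generalizing e with
  | nil => simp [pvBestFrom]
  | cons q t ih =>
    obtain ⟨a, b⟩ := q
    simp only [pvBestFrom]
    split
    · exact le_max_of_le_right (ih e)
    · exact ih e

theorem pvBestFrom_anti {b1 b2 : Int} (h : b1 ≤ b2) (t : List (Int × Int)) :
    pvBestFrom b2 t ≤ pvBestFrom b1 t := by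
  induction t with
  | nil => simp [pvBestFrom]
  | cons q t ih =>
    obtain ⟨a, b⟩ := q
    simp only [pvBestFrom]
    split_ifs with h2 h1 h1
    · exact max_le_max le_rfl ih
    · omega
    · exact le_max_of_le_right ih
    · exact ih

-- exchange step: any chain with starts above b is at most one longer than one above e,
-- provided e is below every end in t
theorem pvBestFrom_le (b e : Int) (t : List (Int × Int)) (he : ∀ q ∈ t, e ≤ q.2) :
    pvBestFrom b t ≤ 1 + pvBestFrom e t := by
  induction t generalizing b with
  | nil => simp [pvBestFrom]
  | cons q t ih =>
    obtain ⟨a, b'⟩ := q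
    have hb' : e ≤ b' := he (a, b') (by simp)
    have ht : ∀ q ∈ t, e ≤ q.2 := fun q hq => he q (by simp [hq])
    have h1 : pvBestFrom b' t ≤ pvBestFrom e t := pvBestFrom_anti hb' t
    have h2 := ih b ht
    simp only [pvBestFrom]
    split_ifs with hb he' he' <;> omega

theorem pvBestC_le (e : Int) (t : List (Int × Int)) (he : ∀ q ∈ t, e ≤ q.2) :
    pvBestC t ≤ 1 + pvBestFrom e t := by
  induction t with
  | nil => simp [pvBestC, pvBestFrom]
  | cons q t ih =>
    obtain ⟨a, b'⟩ := q
    have hb' : e ≤ b' := he (a, b') (by simp)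
    have ht : ∀ q ∈ t, e ≤ q.2 := fun q hq => he q (by simp [hq])
    have h1 : pvBestFrom b' t ≤ pvBestFrom e t := pvBestFrom_anti hb' t
    have h2 := ih ht
    simp only [pvBestC, pvBestFrom]
    split_ifs with he' <;> omega

-- the greedy is optimal on an end-sorted list
theorem pvGA_eq_bestFrom (b : Int) (t : List (Int × Int))
    (hs : t.Pairwise (fun p q => p.2 ≤ q.2)) (hb : ∀ q ∈ t, b ≤ q.2) :
    pvGA b t = pvBestFrom b t := by
  induction t generalizing b with
  | nil => rfl
  | cons q t ih =>
    obtain ⟨a, e⟩ := q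
    have he : ∀ q ∈ t, e ≤ q.2 := by
      intro q hq; exact (List.pairwise_cons.mp hs).1 q hq
    have hs' := (List.pairwise_cons.mp hs).2
    have hbe : b ≤ e := hb (a, e) (by simp)
    simp only [pvGA, pvBestFrom]
    by_cases hab : a ≤ b
    · have : ¬ b < a := by omega
      simp only [hab, if_true, this, if_false]
      exact ih b hs' (fun q hq => le_trans hbe (he q hq))
    · have hba : b < a := by omega
      simp only [hab, if_false, hba, if_true]
      have h1 : pvGA e t = pvBestFrom e t := ih e hs' he
      have h2 : pvBestFrom b t ≤ 1 + pvBestFrom e t := pvBestFrom_le b e t he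
      omega

theorem pvGTop_eq_bestC (t : List (Int × Int)) (hs : t.Pairwise (fun p q => p.2 ≤ q.2)) :
    pvGTop t = pvBestC t := by
  cases t with
  | nil => rfl
  | cons q t =>
    obtain ⟨a, e⟩ := q
    have he : ∀ q ∈ t, e ≤ q.2 := fun q hq => (List.pairwise_cons.mp hs).1 q hq
    have h1 : pvGA e t = pvBestFrom e t :=
      pvGA_eq_bestFrom e t (List.pairwise_cons.mp hs).2 he
    have h2 : pvBestC t ≤ 1 + pvBestFrom e t := pvBestC_le e t he
    simp only [pvGTop, pvBestC]
    omega

-- ---- A side: the port computes pvGTop of the converted list ----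
theorem pvGA_skip (e : Int) (t : List (List Int)) :
    pvGTop ((pvSkipA e t).map pvConv) = pvGA e (t.map pvConv) := by
  induction t with
  | nil => rfl
  | cons p t ih =>
    simp only [pvSkipA, List.map_cons, pvGA, pvConv]
    split_ifs with h
    · exact ih
    · simp [pvGTop, pvConv]

theorem pvLoopA_eq (t : List (List Int)) (ret : Int) :
    pvLoopA t ret = ret + pvGTop (t.map pvConv) := by
  fun_induction pvLoopA t ret with
  | case1 ret => simp [pvGTop]
  | case2 p t ret ih =>
    rw [ih, pvGA_skip]
    simp only [List.map_cons, pvGTop, pvConv]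
    omega

-- ---- B side: the fold computes (dps of the suffix, pvBestC) ----
def pvDpsOf : List (Int × Int) → List (Int × Int)
  | [] => []
  | (a, b) :: t => (a, 1 + pvBestFrom b t) :: pvDpsOf t

theorem pvInnerB_aux (e m : Int) (t : List (Int × Int)) (hm : 0 ≤ m) :
    (pvDpsOf t).foldl (fun m sv => if e < sv.1 ∧ sv.2 > m then sv.2 else m) m
      = max m (pvBestFrom e t) := by
  induction t generalizing m with
  | nil => simp [pvDpsOf, pvBestFrom]; omega
  | cons q t ih =>
    obtain ⟨a, b⟩ := q
    simp only [pvDpsOf, List.foldl_cons, pvBestFrom]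
    by_cases hea : e < a
    · have hstep : (if e < a ∧ 1 + pvBestFrom b t > m then 1 + pvBestFrom b t else m)
          = max m (1 + pvBestFrom b t) := by
        split_ifs with h <;> omega
      rw [hstep, ih _ (by omega)]
      have := pvBestFrom_nonneg b t
      simp only [hea, if_true]
      omega
    · have hstep : (if e < a ∧ 1 + pvBestFrom b t > m then 1 + pvBestFrom b t else m) = m := by
        split_ifs with h
        · exact absurd h.1 hea
        · rfl
      rw [hstep, ih _ hm]
      simp [hea]

theorem pvFoldB_eq (l : List (List Int)) :
    l.foldr (fun p st => pvStepB st p) (([] : List (Int × Int)), (0 : Int))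
      = (pvDpsOf (l.map pvConv), pvBestC (l.map pvConv)) := by
  induction l with
  | nil => rfl
  | cons p t ih =>
    rw [List.foldr_cons, ih]
    simp only [pvStepB, pvInnerB, List.map_cons]
    rw [pvInnerB_aux (PySem.List.pyGetD p 1 0) 0 (t.map pvConv) le_rfl]
    have hnn := pvBestFrom_nonneg (PySem.List.pyGetD p 1 0) (t.map pvConv)
    simp only [pvConv, pvDpsOf, pvBestC]
    rw [max_eq_right hnn]

-- ===== VERDICT (by name: the statement is the Claim_ definition above) =====
theorem findLongestChain2_spec : Claim_equal_findLongestChain2 := by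
  intro pairs _ _
  unfold Spec_findLongestChain2 findLongestChain2 findLongestChain2_alt
  set s := PySem.List.sorted pairs (fun x => PySem.List.pyGetD x 1 0) with hs
  rw [List.foldl_reverse, pvFoldB_eq, pvLoopA_eq]
  have hp : (s.map pvConv).Pairwise (fun p q => p.2 ≤ q.2) := by
    rw [List.pairwise_map]
    exact PySem.List.sorted_pairwise pairs (fun x => PySem.List.pyGetD x 1 0)
  rw [pvGTop_eq_bestC _ hp]
  ring
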